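-- pv_equiv track=rewrite | github.com/mr-eyes/web-codonsOptimizer | cgi-bin/fun.py | getAminoAcid
-- ===== SOURCE A (Python) =====
-- def getAminoAcid(codon = "ATG"):
--     codonUsage ={"A":["GCG","GCA","GCT","GCC"]
--                 ,"C":["TGT","TGC"]
--                 ,"D":["GAT","GAC"]
--                 ,"E":["GAG","GAA"]
--                 ,"F":["TTT","TTC"]
--                 ,"G":["GGG","GGA","GGT","GGC"]
--                 ,"H":["CAT","CAC"]
--                 ,"I":["ATA","ATT","ATC"]
--                 ,"K":["AAG","AAA"]
--                 ,"L":["TTG","TTA","CTG","CTA","CTT", "CTC"]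
--                 ,"M":["ATG"]
--                 ,"N":["AAT","AAC"]
--                 ,"P":["CCG","CCA","CCT","CCC"]
--                 ,"Q":["CAG","CAA"]
--                 ,"R":["AGG","AGA","CGG","CGA","CGT","CGC"]
--                 ,"S":["AGT","AGC","TCG","TCA","TCT","TCC"]
--                 ,"T":["ACG","ACA","ACT","ACC"]
--                 ,"V":["GTG","GTA","GTT","GTC"]
--                 ,"W":["TGG"]
--                 ,"Y":["TAT","TAC"]
--                 ,"*":["TGA","TAG","TAA"]}
--     for amino in codonUsage:
--         if(codon in codonUsage[amino]):
--             return amino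
-- ===== SOURCE B (Python) =====
-- # B: invert the table once into a flat codon->amino dict; a single .get lookup, no loop.
-- _CODON_TO_AMINO = {
--     "GCG": "A",
--     "GCA": "A",
--     "GCT": "A",
--     "GCC": "A",
--     "TGT": "C",
--     "TGC": "C",
--     "GAT": "D",
--     "GAC": "D",
--     "GAG": "E",
--     "GAA": "E",
--     "TTT": "F",
--     "TTC": "F",
--     "GGG": "G",
--     "GGA": "G",
--     "GGT": "G",
--     "GGC": "G",
--     "CAT": "H",
--     "CAC": "H",
--     "ATA": "I",
--     "ATT": "I",
--     "ATC": "I",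
--     "AAG": "K",
--     "AAA": "K",
--     "TTG": "L",
--     "TTA": "L",
--     "CTG": "L",
--     "CTA": "L",
--     "CTT": "L",
--     "CTC": "L",
--     "ATG": "M",
--     "AAT": "N",
--     "AAC": "N",
--     "CCG": "P",
--     "CCA": "P",
--     "CCT": "P",
--     "CCC": "P",
--     "CAG": "Q",
--     "CAA": "Q",
--     "AGG": "R",
--     "AGA": "R",
--     "CGG": "R",
--     "CGA": "R",
--     "CGT": "R",
--     "CGC": "R",
--     "AGT": "S",
--     "AGC": "S",
--     "TCG": "S",
--     "TCA": "S",
--     "TCT": "S",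
--     "TCC": "S",
--     "ACG": "T",
--     "ACA": "T",
--     "ACT": "T",
--     "ACC": "T",
--     "GTG": "V",
--     "GTA": "V",
--     "GTT": "V",
--     "GTC": "V",
--     "TGG": "W",
--     "TAT": "Y",
--     "TAC": "Y",
--     "TGA": "*",
--     "TAG": "*",
--     "TAA": "*",
-- }
--
--
-- def getAminoAcid(codon="ATG"):
--     return _CODON_TO_AMINO.get(codon)
-- ===== Notes on version B (the rewrite author's own statement) =====
-- stated objective: simpler
-- what changed: A loops over the amino->codons table testing list membership per amino; B inverts the table once into a flat codon->amino dict and returns a single .get lookup with no loop.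
import Mathlib
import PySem

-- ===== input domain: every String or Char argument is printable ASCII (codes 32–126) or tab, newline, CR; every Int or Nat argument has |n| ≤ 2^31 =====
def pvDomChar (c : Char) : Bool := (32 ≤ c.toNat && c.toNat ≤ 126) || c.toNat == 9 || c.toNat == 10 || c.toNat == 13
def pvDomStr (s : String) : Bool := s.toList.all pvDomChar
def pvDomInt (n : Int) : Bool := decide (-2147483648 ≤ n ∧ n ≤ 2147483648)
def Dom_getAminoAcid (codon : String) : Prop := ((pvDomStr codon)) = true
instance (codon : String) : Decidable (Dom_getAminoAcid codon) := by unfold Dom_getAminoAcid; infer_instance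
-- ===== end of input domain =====

-- B replaces A's loop over the amino→codons table (with a list-membership test per amino)
-- by a pre-inverted flat codon→amino dict and a single lookup; objective: simpler, no loop.

-- ===== PORT A =====
-- Python A's codonUsage dict literal (amino → list of codons), in insertion order.
def pvTableA : PySem.Dict String (List String) := PySem.Dict.ofList
  [("A", ["GCG", "GCA", "GCT", "GCC"]),
   ("C", ["TGT", "TGC"]),
   ("D", ["GAT", "GAC"]),
   ("E", ["GAG", "GAA"]),
   ("F", ["TTT", "TTC"]),
   ("G", ["GGG", "GGA", "GGT", "GGC"]),
   ("H", ["CAT", "CAC"]),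
   ("I", ["ATA", "ATT", "ATC"]),
   ("K", ["AAG", "AAA"]),
   ("L", ["TTG", "TTA", "CTG", "CTA", "CTT", "CTC"]),
   ("M", ["ATG"]),
   ("N", ["AAT", "AAC"]),
   ("P", ["CCG", "CCA", "CCT", "CCC"]),
   ("Q", ["CAG", "CAA"]),
   ("R", ["AGG", "AGA", "CGG", "CGA", "CGT", "CGC"]),
   ("S", ["AGT", "AGC", "TCG", "TCA", "TCT", "TCC"]),
   ("T", ["ACG", "ACA", "ACT", "ACC"]),
   ("V", ["GTG", "GTA", "GTT", "GTC"]),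
   ("W", ["TGG"]),
   ("Y", ["TAT", "TAC"]),
   ("*", ["TGA", "TAG", "TAA"])]

-- 'for amino in codonUsage: if codon in codonUsage[amino]: return amino' — one step per key.
def pvLoopA (codon : String) : List (String × List String) → Option String
  | [] => none
  | (amino, cs) :: rest => if cs.contains codon then some amino else pvLoopA codon rest

def getAminoAcid (codon : String) : Option String := pvLoopA codon pvTableA.items

-- ===== PORT B =====
-- Source B's flat literal dict _CODON_TO_AMINO (codon → amino).
def pvCodonToAmino : PySem.Dict String String := PySem.Dict.ofList
  [("GCG", "A"),
   ("GCA", "A"),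
   ("GCT", "A"),
   ("GCC", "A"),
   ("TGT", "C"),
   ("TGC", "C"),
   ("GAT", "D"),
   ("GAC", "D"),
   ("GAG", "E"),
   ("GAA", "E"),
   ("TTT", "F"),
   ("TTC", "F"),
   ("GGG", "G"),
   ("GGA", "G"),
   ("GGT", "G"),
   ("GGC", "G"),
   ("CAT", "H"),
   ("CAC", "H"),
   ("ATA", "I"),
   ("ATT", "I"),
   ("ATC", "I"),
   ("AAG", "K"),
   ("AAA", "K"),
   ("TTG", "L"),
   ("TTA", "L"),
   ("CTG", "L"),
   ("CTA", "L"),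
   ("CTT", "L"),
   ("CTC", "L"),
   ("ATG", "M"),
   ("AAT", "N"),
   ("AAC", "N"),
   ("CCG", "P"),
   ("CCA", "P"),
   ("CCT", "P"),
   ("CCC", "P"),
   ("CAG", "Q"),
   ("CAA", "Q"),
   ("AGG", "R"),
   ("AGA", "R"),
   ("CGG", "R"),
   ("CGA", "R"),
   ("CGT", "R"),
   ("CGC", "R"),
   ("AGT", "S"),
   ("AGC", "S"),
   ("TCG", "S"),
   ("TCA", "S"),
   ("TCT", "S"),
   ("TCC", "S"),
   ("ACG", "T"),
   ("ACA", "T"),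
   ("ACT", "T"),
   ("ACC", "T"),
   ("GTG", "V"),
   ("GTA", "V"),
   ("GTT", "V"),
   ("GTC", "V"),
   ("TGG", "W"),
   ("TAT", "Y"),
   ("TAC", "Y"),
   ("TGA", "*"),
   ("TAG", "*"),
   ("TAA", "*")]

def getAminoAcid_alt (codon : String) : Option String := pvCodonToAmino.get? codon

-- ===== PRECONDITION & SPEC =====
def Spec_getAminoAcid (codon : String) (out : Option String) : Prop := out = getAminoAcid_alt codon
instance (codon : String) (out : Option String) : Decidable (Spec_getAminoAcid codon out) := by unfold Spec_getAminoAcid; infer_instance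

-- ===== CLAIM (what is proved, stated in full; the proofs are below) =====
def Claim_equal_getAminoAcid : Prop := ∀ (codon : String), Dom_getAminoAcid codon → Spec_getAminoAcid codon (getAminoAcid codon)

-- ===== LEMMAS AND PROOFS =====

-- First-match lookup in a flat (key, value) list — the shape of B's dict lookup.
def pvLookupFlat (codon : String) (l : List (String × String)) : Option String :=
  (l.find? (fun p => p.1 == codon)).map (·.2)

-- Scanning one amino's codon list, flattened with that amino as the value,
-- is the 'if contains then some amino' step of A's loop.
lemma pvLookupFlat_block (codon amino : String) (cs : List String) (rest : List (String × String)) :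
    pvLookupFlat codon (cs.map (fun c => (c, amino)) ++ rest)
      = if cs.contains codon then some amino else pvLookupFlat codon rest := by
  induction cs with
  | nil => simp [pvLookupFlat]
  | cons c cs ih =>
    by_cases h : codon = c
    · subst h; simp [pvLookupFlat]
    · have h1 : (c == codon) = false := by simp [Ne.symm h]
      have h2 : (codon == c) = false := by simp [h]
      simp only [List.map_cons, List.cons_append, List.contains_cons, h2, Bool.false_or]
      simpa [pvLookupFlat, List.find?_cons, h1] using ih

-- A's loop over the amino→codons table equals first-match lookup in the inverted flat list.
lemma pvLoopA_eq_lookupFlat (codon : String) (tbl : List (String × List String)) :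
    pvLoopA codon tbl
      = pvLookupFlat codon (tbl.flatMap (fun p => p.2.map (fun c => (c, p.1)))) := by
  induction tbl with
  | nil => simp [pvLoopA, pvLookupFlat]
  | cons p rest ih =>
    obtain ⟨amino, cs⟩ := p
    simp only [pvLoopA, List.flatMap_cons, pvLookupFlat_block, ih]

-- B's dict lookup is first-match lookup in its items list.
lemma pvGet?_eq_lookupFlat (codon : String) (l : List (String × String)) :
    (PySem.Dict.mk l).get? codon = pvLookupFlat codon l := by
  induction l with
  | nil => simp [PySem.Dict.get?, pvLookupFlat]
  | cons p rest ih =>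
    obtain ⟨k, v⟩ := p
    rw [PySem.Dict.get?_mk_cons]
    by_cases h : k == codon
    · simp [h, pvLookupFlat]
    · simp only [pvLookupFlat, List.find?_cons, h]
      simpa [h] using ih

-- ===== VERDICT (by name: the statement is the Claim_ definition above) =====
set_option maxRecDepth 8000 in
theorem getAminoAcid_spec : Claim_equal_getAminoAcid := by
  intro codon _
  unfold Spec_getAminoAcid getAminoAcid getAminoAcid_alt
  rw [pvLoopA_eq_lookupFlat]
  have hb : pvCodonToAmino = PySem.Dict.mk
      (pvTableA.items.flatMap (fun p => p.2.map (fun c => (c, p.1)))) := by decide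
  rw [hb, pvGet?_eq_lookupFlat]
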